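-- pv_equiv track=rewrite | github.com/DragonFlyBSD/DeltaPorts | scripts/generator/dportsv3/engine/makefile_cst.py | _consume_logical
-- ===== SOURCE A (Python) =====
-- def _strip_newline(line: str) -> str:
--     return line[:-1] if line.endswith("\n") else line
--
-- def _continued(line_no_nl: str) -> bool:
--     stripped = line_no_nl.rstrip(" \t\r")
--     return stripped.endswith("\\")
--
-- def _consume_logical(
--     lines: list[str],
--     start: int,
-- ) -> tuple[list[str], int, bool]:
--     group: list[str] = []
--     idx = start
--     continuation_open = False
--
--     while idx < len(lines):
--         line = lines[idx]
--         group.append(line)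
--         idx += 1
--         continuation_open = _continued(_strip_newline(line))
--         if not continuation_open:
--             return group, idx, False
--
--     return group, idx, continuation_open
-- ===== SOURCE B (Python) =====
-- def _strip_newline(line: str) -> str:
--     return line[:-1] if line.endswith("\n") else line
--
-- def _continued(line_no_nl: str) -> bool:
--     stripped = line_no_nl.rstrip(" \t\r")
--     return stripped.endswith("\\")
--
-- def _consume_logical(
--     lines: list[str],
--     start: int,
-- ) -> tuple[list[str], int, bool]:
--     n = len(lines)
--     idx = start
--     while idx < n and _continued(_strip_newline(lines[idx])):
--         idx += 1
--     if idx < n: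
--         # terminating non-continued line found: include it
--         return [lines[j] for j in range(start, idx + 1)], idx + 1, False
--     # every consumed line was continued up to EOF
--     return [lines[j] for j in range(start, idx)], idx, idx > start
-- ===== Notes on version B (the rewrite author's own statement) =====
-- stated objective: simpler
-- what changed: B replaces A's per-line append/continuation-flag state machine with a boundary-finding scan (advance idx while the line is continued) followed by a single gather of lines[start..boundary], with the open flag computed from the boundary position.
import Mathlib
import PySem

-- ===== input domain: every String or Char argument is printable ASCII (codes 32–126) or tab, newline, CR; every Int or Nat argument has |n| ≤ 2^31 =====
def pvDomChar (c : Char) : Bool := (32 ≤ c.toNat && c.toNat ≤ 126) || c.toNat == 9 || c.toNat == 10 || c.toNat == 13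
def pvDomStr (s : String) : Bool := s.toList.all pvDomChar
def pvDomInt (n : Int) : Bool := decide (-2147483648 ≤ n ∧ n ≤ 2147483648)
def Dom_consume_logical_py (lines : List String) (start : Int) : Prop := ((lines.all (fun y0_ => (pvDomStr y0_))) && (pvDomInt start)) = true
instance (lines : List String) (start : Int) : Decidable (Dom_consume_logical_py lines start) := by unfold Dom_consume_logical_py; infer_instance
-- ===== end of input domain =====

-- B replaces A's per-line append/flag state machine by a boundary-finding scan followed by
-- a single gather of lines[start..boundary] (objective: simpler decomposition, same cost).

-- ===== PORT A =====
-- _strip_newline: line[:-1] if line.endswith("\n") else line  (s[:-1] = dropLast, exact)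
def pvStripNewline (l : List Char) : List Char :=
  if PySem.Chars.endswith l ['\n'] then l.dropLast else l

-- _continued: line.rstrip(" \t\r").endswith("\\").  rstrip(chars) is ported by hand as
-- dropping trailing characters of the set {' ', '\t', '\r'} (exact for every string).
def pvContinued (l : List Char) : Bool :=
  let stripped := (l.reverse.dropWhile (fun c => c = ' ' || c = '\t' || c = '\r')).reverse
  PySem.Chars.endswith stripped ['\\']

-- A's while-loop, with its state (group, idx, continuation_open) as arguments.
def pvLoopA (lines : List String) (group : List String) (idx : Int) (cont : Bool) :
    List String × Int × Bool :=
  if _h : idx < (lines.length : Int) then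
    match PySem.List.pyGet? lines idx with
    | none => (group, idx, cont)   -- Python raises IndexError here (idx < -len); outside Pre_
    | some line =>
      let cont' := pvContinued (pvStripNewline line.toList)
      if cont' = false then (group ++ [line], idx + 1, false)
      else pvLoopA lines (group ++ [line]) (idx + 1) cont'
  else (group, idx, cont)
termination_by ((lines.length : Int) - idx).toNat
decreasing_by omega

def consume_logical_py (lines : List String) (start : Int) : List String × Int × Bool :=
  pvLoopA lines [] start false

-- ===== PORT B =====
-- B's while-loop: advance idx while lines[idx] is continued; returns the boundary index.
def pvScanB (lines : List String) (idx : Int) : Int :=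
  if _h : idx < (lines.length : Int) then
    match PySem.List.pyGet? lines idx with
    | none => idx   -- Python raises IndexError here; outside Pre_
    | some line =>
      if pvContinued (pvStripNewline line.toList) then pvScanB lines (idx + 1) else idx
  else idx
termination_by ((lines.length : Int) - idx).toNat
decreasing_by omega

def consume_logical_py_alt (lines : List String) (start : Int) : List String × Int × Bool :=
  let n : Int := lines.length
  let idx := pvScanB lines start
  if idx < n then
    ((PySem.List.pyRange start (idx + 1) 1).map (fun j => PySem.List.pyGetD lines j ""),
      idx + 1, false)
  else
    ((PySem.List.pyRange start idx 1).map (fun j => PySem.List.pyGetD lines j ""),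
      idx, decide (start < idx))

-- ===== PRECONDITION & SPEC =====
-- Pre_ excludes exactly the inputs on which Python A raises IndexError (start < -len(lines)).
def Pre_consume_logical_py (lines : List String) (start : Int) : Prop :=
  -(lines.length : Int) ≤ start
instance (lines : List String) (start : Int) : Decidable (Pre_consume_logical_py lines start) := by
  unfold Pre_consume_logical_py; infer_instance

def pvWitness_consume_logical_py : List String × Int := (["a \\", "b"], 0)

def Spec_consume_logical_py (lines : List String) (start : Int) (out : List String × Int × Bool) : Prop := out = consume_logical_py_alt lines start
instance (lines : List String) (start : Int) (out : List String × Int × Bool) : Decidable (Spec_consume_logical_py lines start out) := by unfold Spec_consume_logical_py; infer_instance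

-- ===== CLAIM (what is proved, stated in full; the proofs are below) =====
def Claim_equal_consume_logical_py : Prop := ∀ (lines : List String) (start : Int), Dom_consume_logical_py lines start → Pre_consume_logical_py lines start → Spec_consume_logical_py lines start (consume_logical_py lines start)

-- ===== LEMMAS AND PROOFS =====
theorem pvScanB_ge (lines : List String) (idx : Int) : idx ≤ pvScanB lines idx := by
  fun_induction pvScanB lines idx <;> omega

theorem pvScanB_le (lines : List String) (idx : Int) (h : idx ≤ (lines.length : Int)) :
    pvScanB lines idx ≤ (lines.length : Int) := by
  fun_induction pvScanB lines idx <;> omega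

theorem pvAlt_of_ge (lines : List String) (idx : Int) (h : ¬ idx < (lines.length : Int)) :
    consume_logical_py_alt lines idx = ([], idx, false) := by
  have hs : pvScanB lines idx = idx := by rw [pvScanB.eq_def, dif_neg h]
  simp only [consume_logical_py_alt, hs, if_neg h]
  simp [PySem.List.pyRange_one_eq_nil (by omega : idx ≤ idx)]

theorem pvMain (lines : List String) : ∀ (k : Nat) (idx : Int),
    ((lines.length : Int) - idx).toNat = k → -(lines.length : Int) ≤ idx →
    ∀ (group : List String) (c : Bool),
      pvLoopA lines group idx c =
        (group ++ (consume_logical_py_alt lines idx).1,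
         (consume_logical_py_alt lines idx).2.1,
         if idx < (lines.length : Int) then (consume_logical_py_alt lines idx).2.2 else c) := by
  intro k
  induction k using Nat.strong_induction_on with
  | _ k ih =>
  intro idx hk hlb group c
  by_cases h : idx < (lines.length : Int)
  · have hget : PySem.List.pyGet? lines idx ≠ none := by
      intro hnone
      rw [PySem.List.pyGet?_eq_none_iff] at hnone
      simp [PySem.Raise.InRange] at hnone; omega
    obtain ⟨line, hline⟩ := Option.ne_none_iff_exists'.mp hget
    rw [pvLoopA.eq_def, dif_pos h]
    simp only [hline]
    by_cases hc : pvContinued (pvStripNewline line.toList) = true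
    · -- continued: recurse
      have hscan : pvScanB lines idx = pvScanB lines (idx + 1) := by
        rw [pvScanB.eq_def, dif_pos h]; simp only [hline]; rw [if_pos hc]
      rw [if_neg (by simp [hc])]
      rw [ih ((lines.length : Int) - (idx+1)).toNat (by omega) (idx+1) rfl (by omega)]
      have hge := pvScanB_ge lines (idx + 1)
      have hle := pvScanB_le lines (idx + 1) (by omega)
      by_cases hs : pvScanB lines (idx + 1) < (lines.length : Int)
      · have h1 : idx < pvScanB lines (idx + 1) + 1 := by omega
        have h2 : idx + 1 < (lines.length : Int) := by omega
        simp only [consume_logical_py_alt, hscan, if_pos hs]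
        rw [PySem.List.pyRange_one_cons h1]
        simp [hline, PySem.List.pyGetD, h, h2]
      · have h1 : idx < pvScanB lines (idx + 1) := by omega
        simp only [consume_logical_py_alt, hscan, if_neg hs]
        rw [PySem.List.pyRange_one_cons h1]
        by_cases h2 : idx + 1 < (lines.length : Int) <;>
          simp [hline, PySem.List.pyGetD, h, h1, h2] <;> omega
    · -- not continued: terminate, include this line
      have hscan : pvScanB lines idx = idx := by
        rw [pvScanB.eq_def, dif_pos h]; simp only [hline]; rw [if_neg hc]
      rw [if_pos (by simp [hc])]
      simp only [consume_logical_py_alt, hscan, if_pos h]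
      rw [PySem.List.pyRange_one_cons (by omega : idx < idx + 1)]
      simp [hline, PySem.List.pyGetD, PySem.List.pyRange_one_eq_nil (by omega : idx + 1 ≤ idx + 1)]
  · rw [pvLoopA.eq_def, dif_neg h, pvAlt_of_ge lines idx h]
    simp [h]

-- ===== VERDICT (by name: the statement is the Claim_ definition above) =====
theorem consume_logical_py_spec : Claim_equal_consume_logical_py := by
  intro lines start hdom hpre
  unfold Spec_consume_logical_py consume_logical_py
  rw [pvMain lines _ start rfl hpre]
  by_cases h : start < (lines.length : Int)
  · simp [h]
  · rw [pvAlt_of_ge lines start h]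
    simp [h]
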